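-- pv_equiv track=rewrite | github.com/DannyRuchtie/DRaft | draft/policy.py | _check_large_files
-- ===== SOURCE A (Python) =====
-- from typing import Iterable, List
--
-- def _check_large_files(files: List[str], diff_text: str, threshold: int = 500) -> List[str]:
--     """
--     Check for individual files with large diffs.
--
--     Args:
--         files: List of changed files
--         diff_text: Full diff text
--         threshold: Line threshold for individual file warning
--
--     Returns:
--         List of warnings for large files
--     """
--     warnings: List[str] = []
--
--     # Parse diff to count lines per file
--     file_line_counts: dict[str, int] = {f: 0 for f in files}
--     current_file: str | None = None
--
--     for line in diff_text.splitlines():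
--         if line.startswith("diff --git"):
--             # Extract filename from "diff --git a/path b/path"
--             parts = line.split()
--             if len(parts) >= 4:
--                 current_file = parts[3][2:]  # Remove "b/" prefix
--         elif current_file and line.startswith(("+", "-")) and not line.startswith(("+++", "---")):
--             if current_file in file_line_counts:
--                 file_line_counts[current_file] += 1
--
--     for file_path, line_count in file_line_counts.items():
--         if line_count > threshold:
--             warnings.append(f"Large diff in {file_path}: {line_count} lines (threshold {threshold})")
--
--     return warnings
-- ===== SOURCE B (Python) =====
-- from typing import List
--
--
-- def _check_large_files(files: List[str], diff_text: str, threshold: int = 500) -> List[str]: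
--     """Segment the diff by well-formed 'diff --git' headers, count each
--     segment's changed lines in one shot, then emit warnings in files order."""
--     counts = {f: 0 for f in files}
--
--     # Split the diff into (filename, body-lines) segments.  Only headers whose
--     # split() has >= 4 parts start a new segment; anything else stays in the
--     # current body (so malformed headers never change the attribution).
--     segs = []
--     name = None
--     body = []
--     for line in diff_text.splitlines():
--         parts = line.split()
--         if line.startswith("diff --git") and len(parts) >= 4:
--             if name is not None:
--                 segs.append((name, body))
--             name = parts[3][2:]  # strip "b/" prefix
--             body = []
--         else:
--             body.append(line)
--     if name is not None:
--         segs.append((name, body))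
--
--     # Aggregate each tracked segment's +/- line count in a single pass.
--     for name, body in segs:
--         if name and name in counts:
--             counts[name] += sum(
--                 1 for l in body
--                 if l.startswith(("+", "-")) and not l.startswith(("+++", "---"))
--             )
--
--     return [
--         f"Large diff in {f}: {c} lines (threshold {threshold})"
--         for f, c in counts.items() if c > threshold
--     ]
-- ===== Notes on version B (the rewrite author's own statement) =====
-- stated objective: alternative
-- what changed: A's single line-by-line state machine (tracking current_file and incrementing a dict per line) is replaced by a two-phase decomposition: first split the diff into per-file segments at well-formed 'diff --git' headers, then add one aggregated +/- line count per segment and emit warnings via filter/map over the seeded dict.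
import Mathlib
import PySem

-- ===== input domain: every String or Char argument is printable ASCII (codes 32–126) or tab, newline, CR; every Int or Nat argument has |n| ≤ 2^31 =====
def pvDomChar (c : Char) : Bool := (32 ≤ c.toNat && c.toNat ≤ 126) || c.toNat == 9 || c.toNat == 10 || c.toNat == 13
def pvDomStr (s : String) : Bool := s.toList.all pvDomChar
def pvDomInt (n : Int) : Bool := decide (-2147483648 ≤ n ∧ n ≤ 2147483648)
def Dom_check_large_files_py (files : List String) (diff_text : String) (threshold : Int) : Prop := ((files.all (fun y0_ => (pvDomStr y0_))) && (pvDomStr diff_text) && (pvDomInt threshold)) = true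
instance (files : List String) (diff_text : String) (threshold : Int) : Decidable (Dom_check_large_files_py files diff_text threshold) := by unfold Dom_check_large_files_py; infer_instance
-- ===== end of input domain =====

-- B replaces A's per-line (counts, current_file) state machine by a different decomposition:
-- split the diff into per-file segments first, then aggregate one count per segment
-- ('alternative', same cost). Return values proved equal on the whole domain.

-- shared helpers: the warning message and the "+/- but not +++/---" line test,
-- identical in both Pythons
def pvMsg (f : String) (c : Int) (t : Int) : String :=
  PySem.Str.join "" ["Large diff in ", f, ": ", PySem.Int.toStr c,
    " lines (threshold ", PySem.Int.toStr t, ")"]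

def pvIsBody (l : String) : Bool :=
  (PySem.Str.startswith l "+" || PySem.Str.startswith l "-")
    && !(PySem.Str.startswith l "+++") && !(PySem.Str.startswith l "---")

-- ===== PORT A =====
-- A's loop body: update (file_line_counts, current_file) by one diff line
def pvLineStepA (st : PySem.Dict String Int × Option String) (line : String) :
    PySem.Dict String Int × Option String :=
  if PySem.Str.startswith line "diff --git" then
    let parts := PySem.Str.split₀ line
    if 4 ≤ parts.length then
      (st.1, some (PySem.Str.slice (PySem.List.pyGetD parts 3 "") (some 2) none))
    else st
  else
    match st.2 with
    | none => st
    | some f =>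
      if !(f == "") && pvIsBody line then
        if st.1.contains f then (st.1.insert f (st.1.getD f 0 + 1), st.2) else st
      else st

def check_large_files_py (files : List String) (diff_text : String) (threshold : Int) :
    List String :=
  let file_line_counts : PySem.Dict String Int :=
    files.foldl (fun d f => d.insert f 0) PySem.Dict.empty
  let st := (PySem.Str.splitlines diff_text).foldl pvLineStepA (file_line_counts, none)
  st.1.items.foldl
    (fun warnings p =>
      if p.2 > threshold then warnings ++ [pvMsg p.1 p.2 threshold] else warnings)
    []

-- ===== PORT B =====
def pvBodyCount (body : List String) : Int :=
  body.foldl (fun n l => if pvIsBody l then n + 1 else n) 0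

-- B's first loop body: build (segments, current name, current body)
def pvSegStepB (st : List (String × List String) × Option String × List String)
    (line : String) : List (String × List String) × Option String × List String :=
  let parts := PySem.Str.split₀ line
  if PySem.Str.startswith line "diff --git" && decide (4 ≤ parts.length) then
    ((match st.2.1 with
      | some n => st.1 ++ [(n, st.2.2)]
      | none => st.1),
     some (PySem.Str.slice (PySem.List.pyGetD parts 3 "") (some 2) none), [])
  else (st.1, st.2.1, st.2.2 ++ [line])

-- B's second loop body: add one segment's aggregated count
def pvAddSeg (d : PySem.Dict String Int) (s : String × List String) :
    PySem.Dict String Int :=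
  if !(s.1 == "") && d.contains s.1 then d.insert s.1 (d.getD s.1 0 + pvBodyCount s.2)
  else d

def check_large_files_py_alt (files : List String) (diff_text : String) (threshold : Int) :
    List String :=
  let counts0 : PySem.Dict String Int :=
    files.foldl (fun d f => d.insert f 0) PySem.Dict.empty
  let st := (PySem.Str.splitlines diff_text).foldl pvSegStepB ([], none, [])
  let segs := match st.2.1 with | some n => st.1 ++ [(n, st.2.2)] | none => st.1
  let counts := segs.foldl pvAddSeg counts0
  (counts.items.filter (fun p => p.2 > threshold)).map (fun p => pvMsg p.1 p.2 threshold)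

-- ===== PRECONDITION & SPEC =====
def Spec_check_large_files_py (files : List String) (diff_text : String) (threshold : Int) (out : List String) : Prop := out = check_large_files_py_alt files diff_text threshold
instance (files : List String) (diff_text : String) (threshold : Int) (out : List String) : Decidable (Spec_check_large_files_py files diff_text threshold out) := by unfold Spec_check_large_files_py; infer_instance

-- ===== CLAIM (what is proved, stated in full; the proofs are below) =====
def Claim_equal_check_large_files_py : Prop := ∀ (files : List String) (diff_text : String) (threshold : Int), Dom_check_large_files_py files diff_text threshold → Spec_check_large_files_py files diff_text threshold (check_large_files_py files diff_text threshold)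

-- ===== LEMMAS AND PROOFS =====

-- proof-side vocabulary
def pvHdr (l : String) : Bool :=
  PySem.Str.startswith l "diff --git" && decide (4 ≤ (PySem.Str.split₀ l).length)

def pvName (l : String) : String :=
  PySem.Str.slice (PySem.List.pyGetD (PySem.Str.split₀ l) 3 "") (some 2) none

def pvSegsOf : List String → List String × List (String × List String)
  | [] => ([], [])
  | l :: rest =>
    let r := pvSegsOf rest
    if pvHdr l then ([], (pvName l, r.1) :: r.2) else (l :: r.1, r.2)

def pvFlush (st : List (String × List String) × Option String × List String) :
    List (String × List String) :=
  match st.2.1 with | some n => st.1 ++ [(n, st.2.2)] | none => st.1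

def pvLead (d : PySem.Dict String Int) (cf : Option String) (lead : List String) :
    PySem.Dict String Int :=
  match cf with | none => d | some f => pvAddSeg d (f, lead)

def pvInit (files : List String) : PySem.Dict String Int :=
  files.foldl (fun d f => d.insert f 0) PySem.Dict.empty

lemma pvBodyCount_eq (body : List String) :
    pvBodyCount body = (body.countP pvIsBody : Int) := by
  simpa [pvBodyCount] using PySem.List.foldl_if_add_one pvIsBody body 0

lemma pv_sw_diffgit_sw_false (l : String) (p : String) (c : Char) (cs : List Char)
    (hpl : p.toList = c :: cs) (hd : c ≠ 'd')
    (h : PySem.Str.startswith l "diff --git" = true) :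
    PySem.Str.startswith l p = false := by
  rcases hs : PySem.Str.startswith l p with _ | _
  · rfl
  · exfalso
    rw [PySem.Str.startswith_eq] at h hs
    rcases (PySem.Chars.startswith_iff _ _).1 h with ⟨t1, e1⟩
    rcases (PySem.Chars.startswith_iff _ _).1 hs with ⟨t2, e2⟩
    rw [← e1, hpl] at e2
    have hdg : ("diff --git" : String).toList = 'd' :: "iff --git".toList := by decide
    rw [hdg] at e2
    simp at e2
    exact hd e2.1

lemma pv_header_not_body (l : String)
    (h : PySem.Str.startswith l "diff --git" = true) : pvIsBody l = false := by
  have h1 : PySem.Str.startswith l "+" = false :=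
    pv_sw_diffgit_sw_false l "+" '+' [] (by decide) (by decide) h
  have h2 : PySem.Str.startswith l "-" = false :=
    pv_sw_diffgit_sw_false l "-" '-' [] (by decide) (by decide) h
  unfold pvIsBody
  rw [h1, h2]
  simp

lemma pv_insert_getD_self (d : PySem.Dict String Int) (f : String)
    (hn : d.keys.Nodup) (hc : d.contains f = true) :
    d.insert f (d.getD f 0) = d := by
  apply PySem.Dict.ext
  rw [PySem.Dict.items_insert_of_contains d _ hc]
  conv_rhs => rw [← List.map_id d.items]
  apply List.map_congr_left
  intro p hp
  by_cases hpf : p.1 = f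
  · have hmem : (p.1, p.2) ∈ d.items := by simpa using hp
    have hg : d.get? p.1 = some p.2 := PySem.Dict.get?_of_mem_items d hmem hn
    subst hpf
    have hgd : d.getD p.1 0 = p.2 := by
      rw [PySem.Dict.getD_eq_get?_getD, hg]; rfl
    simp [hgd]
  · simp [hpf]

lemma pv_addSeg_nil (d : PySem.Dict String Int) (f : String) (hn : d.keys.Nodup) :
    pvAddSeg d (f, []) = d := by
  unfold pvAddSeg
  split_ifs with h
  · rw [Bool.and_eq_true] at h
    have : pvBodyCount [] = 0 := rfl
    rw [this, add_zero]
    exact pv_insert_getD_self d f hn h.2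
  · rfl

lemma pv_addSeg_cons_notbody (d : PySem.Dict String Int) (f l : String)
    (b : List String) (hb : pvIsBody l = false) :
    pvAddSeg d (f, l :: b) = pvAddSeg d (f, b) := by
  simp [pvAddSeg, pvBodyCount_eq, hb]

def pvStepD (d : PySem.Dict String Int) (f l : String) : PySem.Dict String Int :=
  if !(f == "") && pvIsBody l then
    (if d.contains f then d.insert f (d.getD f 0 + 1) else d)
  else d

lemma pv_step_body (d : PySem.Dict String Int) (f l : String) (b : List String) :
    pvAddSeg (pvStepD d f l) (f, b) = pvAddSeg d (f, l :: b) := by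
  unfold pvStepD
  by_cases hf : (f == "") = true
  · have hg : (!(f == "") && pvIsBody l) = false := by simp [hf]
    rw [hg]
    simp [pvAddSeg, hf]
  · have hf' : (f == "") = false := by simpa using hf
    rcases hb : pvIsBody l with _ | _
    · simp only [Bool.and_false, Bool.false_eq_true, if_false]
      exact (pv_addSeg_cons_notbody d f l b hb).symm
    · have hg : (!(f == "") && true) = true := by simp [hf']
      rw [if_pos hg]
      rcases hc : d.contains f with _ | _
      · simp [pvAddSeg, hc]
      · have hc' : (d.insert f (d.getD f 0 + 1)).contains f = true :=
          PySem.Dict.contains_insert_self d f _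
        simp only [pvAddSeg, hf', hc, hc', Bool.not_false, Bool.true_and, if_pos,
          PySem.Dict.getD_insert_self, PySem.Dict.insert_insert_self,
          pvBodyCount_eq, List.countP_cons, hb]
        congr 1
        push_cast
        ring

lemma pv_stepA_some (d : PySem.Dict String Int) (f l : String)
    (hsw : PySem.Str.startswith l "diff --git" = false) :
    pvLineStepA (d, some f) l = (pvStepD d f l, some f) := by
  simp only [pvLineStepA, pvStepD]
  rw [if_neg (by rw [hsw]; simp)]
  show (if !(f == "") && pvIsBody l then
      (if d.contains f then (d.insert f (d.getD f 0 + 1), some f) else (d, some f))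
    else (d, some f))
    = ((if !(f == "") && pvIsBody l then
        (if d.contains f then d.insert f (d.getD f 0 + 1) else d) else d), some f)
  split_ifs <;> rfl

lemma pv_B_char (lines : List String) :
    ∀ (segs : List (String × List String)) (name : Option String) (body : List String),
      pvFlush (lines.foldl pvSegStepB (segs, name, body))
        = (match name with
           | none => segs ++ (pvSegsOf lines).2
           | some n => segs ++ (n, body ++ (pvSegsOf lines).1) :: (pvSegsOf lines).2) := by
  induction lines with
  | nil =>
    intro segs name body
    cases name <;> simp [pvFlush, pvSegsOf]
  | cons l rest ih =>
    intro segs name body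
    simp only [List.foldl_cons]
    rcases hh : pvHdr l with _ | _
    · have hc : (PySem.Str.startswith l "diff --git"
          && decide (4 ≤ (PySem.Str.split₀ l).length)) = false := hh
      have hstep : pvSegStepB (segs, name, body) l = (segs, name, body ++ [l]) := by
        simp only [pvSegStepB]
        rw [if_neg (by rw [hc]; simp)]
      rw [hstep, ih]
      cases name <;> simp [pvSegsOf, hh]
    · have hc : (PySem.Str.startswith l "diff --git"
          && decide (4 ≤ (PySem.Str.split₀ l).length)) = true := hh
      have hstep : pvSegStepB (segs, name, body) l
          = ((match name with
              | some n => segs ++ [(n, body)]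
              | none => segs), some (pvName l), []) := by
        simp only [pvSegStepB]
        rw [if_pos hc]
        rfl
      rw [hstep, ih]
      cases name <;> simp [pvSegsOf, hh]

lemma pv_A_char (lines : List String) :
    ∀ (d : PySem.Dict String Int) (cf : Option String), d.keys.Nodup →
      (lines.foldl pvLineStepA (d, cf)).1
        = ((pvSegsOf lines).2).foldl pvAddSeg (pvLead d cf (pvSegsOf lines).1) := by
  induction lines with
  | nil =>
    intro d cf hn
    cases cf with
    | none => simp [pvSegsOf, pvLead]
    | some f => simp [pvSegsOf, pvLead, pv_addSeg_nil d f hn]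
  | cons l rest ih =>
    intro d cf hn
    simp only [List.foldl_cons]
    rcases hsw : PySem.Str.startswith l "diff --git" with _ | _
    · -- not a header line at all
      have hh : pvHdr l = false := by unfold pvHdr; rw [hsw]; simp
      cases cf with
      | none =>
        have hstep : pvLineStepA (d, none) l = (d, none) := by
          simp only [pvLineStepA]
          rw [if_neg (by rw [hsw]; simp)]
        rw [hstep, ih d none hn]
        simp [pvSegsOf, hh, pvLead]
      | some f =>
        have hn' : (pvStepD d f l).keys.Nodup := by
          unfold pvStepD
          split_ifs with h1 h2
          · rw [PySem.Dict.keys_insert_of_contains d _ h2]; exact hn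
          · exact hn
          · exact hn
        rw [pv_stepA_some d f l hsw, ih (pvStepD d f l) (some f) hn']
        simp only [pvSegsOf, hh, Bool.false_eq_true, if_false, pvLead]
        rw [pv_step_body d f l (pvSegsOf rest).1]
    · by_cases hlen : 4 ≤ (PySem.Str.split₀ l).length
      · -- a well-formed header
        have hh : pvHdr l = true := by unfold pvHdr; rw [hsw]; simp [hlen]
        have hstep : pvLineStepA (d, cf) l = (d, some (pvName l)) := by
          simp only [pvLineStepA]
          rw [if_pos hsw, if_pos hlen]
          rfl
        rw [hstep, ih d (some (pvName l)) hn]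
        cases cf with
        | none => simp [pvSegsOf, hh, pvLead]
        | some f => simp [pvSegsOf, hh, pvLead, pv_addSeg_nil d f hn]
      · -- malformed header: state unchanged, and the line is never a +/- line
        have hh : pvHdr l = false := by unfold pvHdr; rw [hsw]; simp [hlen]
        have hstep : pvLineStepA (d, cf) l = (d, cf) := by
          simp only [pvLineStepA]
          rw [if_pos hsw, if_neg hlen]
        rw [hstep, ih d cf hn]
        have hb : pvIsBody l = false := pv_header_not_body l hsw
        cases cf with
        | none => simp [pvSegsOf, hh, pvLead]
        | some f =>
          simp [pvSegsOf, hh, pvLead, pv_addSeg_cons_notbody d f l (pvSegsOf rest).1 hb]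

lemma pv_init_nodup (files : List String) : (pvInit files).keys.Nodup :=
  PySem.Dict.nodup_keys_foldl_insert files (fun _ _ => (0 : Int)) PySem.Dict.empty
    PySem.Dict.nodup_keys_empty

-- ===== VERDICT (by name: the statement is the Claim_ definition above) =====
theorem check_large_files_py_spec : Claim_equal_check_large_files_py := by
  intro files diff_text threshold _hdom
  unfold Spec_check_large_files_py
  have e1 : check_large_files_py files diff_text threshold
      = ((PySem.Str.splitlines diff_text).foldl pvLineStepA (pvInit files, none)).1.items.foldl
          (fun warnings p =>
            if p.2 > threshold then warnings ++ [pvMsg p.1 p.2 threshold] else warnings)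
          [] := rfl
  have e2 : check_large_files_py_alt files diff_text threshold
      = (((pvFlush ((PySem.Str.splitlines diff_text).foldl pvSegStepB ([], none, []))).foldl
            pvAddSeg (pvInit files)).items.filter (fun p => p.2 > threshold)).map
          (fun p => pvMsg p.1 p.2 threshold) := rfl
  rw [e1, e2]
  rw [pv_A_char (PySem.Str.splitlines diff_text) (pvInit files) none (pv_init_nodup files)]
  rw [pv_B_char (PySem.Str.splitlines diff_text) [] none []]
  simp only [pvLead, List.nil_append]
  rw [PySem.List.foldl_append_ite (fun p : String × Int => p.2 > threshold)
    (fun p : String × Int => pvMsg p.1 p.2 threshold)]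
  simp
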